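-- pv_equiv track=rewrite | github.com/bedhededdy/advent-of-code | 2024/p2.py | almost_substantial_diff
-- ===== SOURCE A (Python) =====
-- def has_substantial_diff(line):
--     prev = line[0]
--     for i in range(1, len(line)):
--         val = abs(prev - line[i])
--         if val < 1 or val > 3:
--             return True
--         prev = line[i]
--     return False
--
-- def generate_list_variants(list, removable_indexes):
--     variants = []
--     if len(removable_indexes) == 0:
--         for i in range(len(list)):
--             variants.append(list[:i] + list[i+1:])
--     else:
--         for i in range(len(list)):
--             if i in removable_indexes:
--                 variants.append(list[:i] + list[i+1:])
--     return variants
--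
-- def almost_substantial_diff(line):
--     variants = generate_list_variants(line, [])
--     removable_indexes = []
--     res = True
--     for i in range(len(variants)):
--         variant = variants[i]
--         if not has_substantial_diff(variant):
--             removable_indexes.append(i)
--             res = False
--     if not has_substantial_diff(line):
--         removable_indexes.append(None)
--         res = False
--     return res, removable_indexes
-- ===== SOURCE B (Python) =====
-- def almost_substantial_diff(line):
--     n = len(line)
--     # one pass over adjacent pairs: locate the first and last "bad" edge
--     # (edge j is bad when abs(line[j]-line[j+1]) is outside [1,3])
--     first_bad = None
--     last_bad = None
--     for j in range(n - 1):
--         d = abs(line[j] - line[j + 1])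
--         if d < 1 or d > 3:
--             if first_bad is None:
--                 first_bad = j
--             last_bad = j
--     removable = []
--     for i in range(n):
--         # removing element i deletes edges i-1 and i and (for interior i)
--         # creates the join edge (i-1, i+1); every other edge must already be good
--         left_ok = first_bad is None or first_bad >= i - 1
--         right_ok = last_bad is None or last_bad <= i
--         if i == 0 or i == n - 1:
--             join_ok = True
--         else:
--             d = abs(line[i - 1] - line[i + 1])
--             join_ok = 1 <= d <= 3
--         if left_ok and right_ok and join_ok:
--             removable.append(i)
--     if first_bad is None:
--         removable.append(None)
--     return (len(removable) == 0, removable)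
-- ===== Notes on version B (the rewrite author's own statement) =====
-- stated objective: faster
-- what changed: Instead of materialising every length-(n-1) variant and rescanning each (O(n^2)), B scans the adjacent differences once to find the first and last bad edge and decides each removal index in O(1) (a removal works iff no bad edge lies strictly left of i-1 or strictly right of i and the new join edge is in range).
import Mathlib
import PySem

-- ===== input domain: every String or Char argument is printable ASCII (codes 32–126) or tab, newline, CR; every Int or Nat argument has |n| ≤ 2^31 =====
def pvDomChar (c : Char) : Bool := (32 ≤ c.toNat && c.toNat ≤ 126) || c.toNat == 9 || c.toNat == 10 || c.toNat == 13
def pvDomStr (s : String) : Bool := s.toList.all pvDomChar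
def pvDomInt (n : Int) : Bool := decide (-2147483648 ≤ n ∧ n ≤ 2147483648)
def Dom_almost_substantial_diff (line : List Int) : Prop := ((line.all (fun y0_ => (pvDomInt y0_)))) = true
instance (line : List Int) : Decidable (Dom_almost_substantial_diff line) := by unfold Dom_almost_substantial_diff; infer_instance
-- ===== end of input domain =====

-- B replaces A's build-every-variant-and-rescan search by one scan for the first/last bad
-- adjacent edge plus an O(1) test per removal index.


-- ===== PORT A =====
-- the loop 'for i in range(1, len(line))' of has_substantial_diff, carrying prev
def hsdGo : Int → List Int → Bool
  | _, [] => false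
  | prev, x :: rest =>
    let val := |prev - x|
    if val < 1 ∨ val > 3 then true else hsdGo x rest

def has_substantial_diff (line : List Int) : Bool :=
  match line with
  | [] => false  -- Python raises IndexError here (line[0]); excluded by Pre_
  | p :: rest => hsdGo p rest

-- body of the variants.append loop of generate_list_variants (removable_indexes = [])
def gvStep (l : List Int) (acc : List (List Int)) (i : Nat) : List (List Int) :=
  acc ++ [PySem.List.slice l none (some (i : Int)) ++
          PySem.List.slice l (some ((i : Int) + 1)) none]

def generate_list_variants (l : List Int) : List (List Int) :=
  (List.range l.length).foldl (gvStep l) []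

-- body of A's main loop over 'for i in range(len(variants))'
def asdStep (variants : List (List Int)) (st : Bool × List (Option Int)) (i : Nat) :
    Bool × List (Option Int) :=
  let variant := variants.getD i []
  if has_substantial_diff variant = false then (false, st.2 ++ [some (i : Int)]) else st

def almost_substantial_diff (line : List Int) : Bool × List (Option Int) :=
  let variants := generate_list_variants line
  let st := (List.range variants.length).foldl (asdStep variants) (true, [])
  if has_substantial_diff line = false then (false, st.2 ++ [none]) else (st.1, st.2)

-- ===== PORT B =====
-- body of B's first loop: running (first_bad, last_bad) over edge index j
def altScanStep (l : List Int) (st : Option Int × Option Int) (j : Nat) :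
    Option Int × Option Int :=
  let d := |PySem.List.pyGetD l (j : Int) 0 - PySem.List.pyGetD l ((j : Int) + 1) 0|
  if d < 1 ∨ d > 3 then ((if st.1 = none then some (j : Int) else st.1), some (j : Int))
  else st

-- B's O(1) per-index test: left_ok and right_ok and join_ok
def bbool (l : List Int) (fl : Option Int × Option Int) (i : Nat) : Bool :=
  let leftOk := match fl.1 with | none => true | some f => decide ((i : Int) - 1 ≤ f)
  let rightOk := match fl.2 with | none => true | some lb => decide (lb ≤ (i : Int))
  let joinOk :=
    if i = 0 ∨ i = l.length - 1 then true
    else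
      let d := |PySem.List.pyGetD l ((i : Int) - 1) 0 - PySem.List.pyGetD l ((i : Int) + 1) 0|
      decide (1 ≤ d ∧ d ≤ 3)
  leftOk && rightOk && joinOk

-- body of B's second loop: 'if left_ok and right_ok and join_ok: removable.append(i)'
def altRemStep (l : List Int) (fl : Option Int × Option Int) (acc : List (Option Int)) (i : Nat) :
    List (Option Int) :=
  if bbool l fl i then acc ++ [some (i : Int)] else acc

def almost_substantial_diff_alt (line : List Int) : Bool × List (Option Int) :=
  let n : Nat := line.length
  let fl := (List.range (n - 1)).foldl (altScanStep line) (none, none)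
  let removable := (List.range n).foldl (altRemStep line fl) []
  let removable := if fl.1 = none then removable ++ [none] else removable
  (decide (removable.length = 0), removable)

-- ===== PRECONDITION & SPEC =====
-- Pre_ excludes exactly the lists of length ≤ 1, on which the Python A raises IndexError
-- (has_substantial_diff reads line[0] of an empty list or an empty variant).
def Pre_almost_substantial_diff (line : List Int) : Prop := 2 ≤ line.length
instance (line : List Int) : Decidable (Pre_almost_substantial_diff line) := by
  unfold Pre_almost_substantial_diff; infer_instance
def pvWitness_almost_substantial_diff : List Int := [1, 2, 3]


def Spec_almost_substantial_diff (line : List Int) (out : Bool × List (Option Int)) : Prop :=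
  out = almost_substantial_diff_alt line
instance (line : List Int) (out : Bool × List (Option Int)) :
    Decidable (Spec_almost_substantial_diff line out) := by
  unfold Spec_almost_substantial_diff; infer_instance

-- ===== CLAIM (what is proved, stated in full; the proofs are below) =====
def Claim_equal_almost_substantial_diff : Prop :=
  ∀ (line : List Int), Dom_almost_substantial_diff line →
    Pre_almost_substantial_diff line →
    Spec_almost_substantial_diff line (almost_substantial_diff line)

-- ===== LEMMAS AND PROOFS =====
abbrev okE (a b : Int) : Prop := 1 ≤ |a - b| ∧ |a - b| ≤ 3


lemma hsdGo_eq_false_iff (rest : List Int) : ∀ (prev : Int),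
    hsdGo prev rest = false ↔ List.IsChain okE (prev :: rest) := by
  induction rest with
  | nil => intro prev; simp [hsdGo]
  | cons x xs ih =>
    intro prev
    simp only [hsdGo, List.isChain_cons (l := x :: xs), List.head?_cons, Option.mem_some_iff]
    constructor
    · intro h
      split_ifs at h with hb
      exact ⟨fun y hy => hy ▸ ⟨by omega, by omega⟩, ((ih x).mp h)⟩
    · rintro ⟨h1, h2⟩
      have hok := h1 x rfl
      unfold okE at hok
      rw [if_neg (by omega)]
      exact (ih x).mpr h2

lemma hsd_eq_false_iff (l : List Int) :
    has_substantial_diff l = false ↔ List.IsChain okE l := by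
  cases l with
  | nil => simp [has_substantial_diff]
  | cons p rest => simpa [has_substantial_diff] using hsdGo_eq_false_iff rest p

abbrev edge (l : List Int) (j : Nat) : Prop := okE (l.getD j 0) (l.getD (j + 1) 0)

lemma chain_take (l : List Int) (i : Nat) (hi : i ≤ l.length) :
    List.IsChain okE (l.take i) ↔ ∀ j, j + 1 < i → edge l j := by
  rw [List.isChain_iff_getElem]
  have hlen : (l.take i).length = i := by simp [Nat.min_eq_left hi]
  constructor
  · intro h j hj
    have h1 : j + 1 < l.length := by omega
    have := h j (by omega)
    unfold edge
    rw [List.getD_eq_getElem l 0 (by omega), List.getD_eq_getElem l 0 h1]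
    simpa [List.getElem_take] using this
  · intro h j hj
    rw [hlen] at hj
    have h1 : j + 1 < l.length := by omega
    have := h j hj
    unfold edge at this
    rw [List.getD_eq_getElem l 0 (by omega), List.getD_eq_getElem l 0 h1] at this
    simpa [List.getElem_take] using this

lemma chain_drop (l : List Int) (k : Nat) :
    List.IsChain okE (l.drop k) ↔ ∀ j, k ≤ j → j + 1 < l.length → edge l j := by
  rw [List.isChain_iff_getElem]
  constructor
  · intro h j hk hj
    have := h (j - k) (by simp; omega)
    unfold edge
    rw [List.getD_eq_getElem l 0 (by omega), List.getD_eq_getElem l 0 hj]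
    simp only [List.getElem_drop] at this
    have e1 : k + (j - k) = j := by omega
    have e2 : k + (j - k + 1) = j + 1 := by omega
    simp only [e1, e2] at this
    exact this
  · intro h m hm
    simp only [List.length_drop] at hm
    have := h (k + m) (by omega) (by omega)
    unfold edge at this
    rw [List.getD_eq_getElem l 0 (by omega), List.getD_eq_getElem l 0 (by omega)] at this
    simpa [List.getElem_drop, Nat.add_assoc] using this


lemma variants_eq (l : List Int) :
    generate_list_variants l =
      (List.range l.length).map (fun i => l.take i ++ l.drop (i + 1)) := by
  unfold generate_list_variants
  rw [show gvStep l = (fun (acc : List (List Int)) (i : Nat) =>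
      acc ++ [PySem.List.slice l none (some (i : Int)) ++
              PySem.List.slice l (some ((i : Int) + 1)) none]) from rfl]
  rw [PySem.List.foldl_append_singleton_eq_map, List.nil_append]
  refine List.map_congr_left (fun i _ => ?_)
  have h1 : PySem.List.slice l none (some (i : Int)) = l.take i :=
    PySem.List.slice_to_natCast l i
  have h2 : PySem.List.slice l (some ((i : Int) + 1)) none = l.drop (i + 1) := by
    have : ((i : Int) + 1) = ((i + 1 : Nat) : Int) := by push_cast; ring
    rw [this, PySem.List.slice_from_natCast]
  simp [h1, h2]

lemma foldA (c : Nat → Prop) [DecidablePred c] (g : Nat → Option Int) :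
    ∀ (xs : List Nat) (r : Bool) (acc : List (Option Int)),
      xs.foldl (fun (st : Bool × List (Option Int)) i =>
          if c i then (false, st.2 ++ [g i]) else st) (r, acc) =
        (r && !(xs.any fun i => decide (c i)),
         acc ++ (xs.filter (fun i => decide (c i))).map g) := by
  intro xs
  induction xs with
  | nil => intro r acc; simp
  | cons x xs ih =>
    intro r acc
    simp only [List.foldl_cons, List.any_cons, List.filter_cons]
    by_cases hx : c x
    · simp [hx, ih]
    · simp [hx, ih]

lemma foldFL (c : Nat → Prop) [DecidablePred c] (m : Nat) :
    (List.range m).foldl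
      (fun (st : Option Int × Option Int) j =>
        if c j then ((if st.1 = none then some (j : Int) else st.1), some (j : Int)) else st)
      (none, none) =
    (((List.range m).filter (fun j => decide (c j))).head?.map (fun j => (j : Int)),
     ((List.range m).filter (fun j => decide (c j))).getLast?.map (fun j => (j : Int))) := by
  induction m with
  | zero => simp
  | succ m ih =>
    rw [List.range_succ, List.foldl_append, ih, List.filter_append]
    by_cases hm : c m
    · simp only [List.foldl_cons, List.foldl_nil, List.filter_cons, hm, decide_eq_true_eq,
        if_pos, List.filter_nil]
      cases hfe : ((List.range m).filter (fun j => decide (c j))) with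
      | nil => simp
      | cons a t =>
        rw [List.getLast?_concat]
        simp
    · simp [hm]

def badIdx (l : List Int) : List Nat :=
  (List.range (l.length - 1)).filter (fun j => decide (¬ edge l j))

lemma mem_badIdx (l : List Int) (j : Nat) :
    j ∈ badIdx l ↔ j + 1 < l.length ∧ ¬ edge l j := by
  simp only [badIdx, List.mem_filter, List.mem_range, decide_not, Bool.not_eq_true',
    decide_eq_false_iff_not]
  constructor
  · rintro ⟨h1, h2⟩; exact ⟨by omega, h2⟩
  · rintro ⟨h1, h2⟩; exact ⟨by omega, h2⟩

lemma badIdx_sorted (l : List Int) : (badIdx l).Pairwise (· < ·) :=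
  (List.pairwise_lt_range).filter _

lemma badIdx_nil_iff (l : List Int) :
    badIdx l = [] ↔ ∀ j, j + 1 < l.length → edge l j := by
  rw [List.eq_nil_iff_forall_not_mem]
  constructor
  · intro h j hj
    by_contra hne
    exact h j ((mem_badIdx l j).mpr ⟨hj, hne⟩)
  · intro h j hj
    obtain ⟨h1, h2⟩ := (mem_badIdx l j).mp hj
    exact h2 (h j h1)

lemma head_badIdx (l : List Int) (f : Nat) (h : (badIdx l).head? = some f) :
    (f + 1 < l.length ∧ ¬ edge l f) ∧ ∀ j, j + 1 < l.length → ¬ edge l j → f ≤ j := by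
  cases hb : badIdx l with
  | nil => rw [hb] at h; simp at h
  | cons a t =>
    rw [hb] at h
    simp only [List.head?_cons, Option.some.injEq] at h
    rw [h] at hb
    have hmem : f ∈ badIdx l := by rw [hb]; exact List.mem_cons_self
    refine ⟨(mem_badIdx l f).mp hmem, fun j hj hne => ?_⟩
    have hjm : j ∈ badIdx l := (mem_badIdx l j).mpr ⟨hj, hne⟩
    rw [hb] at hjm
    rcases List.mem_cons.mp hjm with h1 | h1
    · omega
    · have hp := badIdx_sorted l
      rw [hb] at hp
      have := (List.pairwise_cons.mp hp).1 j h1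
      omega

lemma last_badIdx (l : List Int) (b : Nat) (h : (badIdx l).getLast? = some b) :
    (b + 1 < l.length ∧ ¬ edge l b) ∧ ∀ j, j + 1 < l.length → ¬ edge l j → j ≤ b := by
  obtain ⟨t, ht⟩ := List.getLast?_eq_some_iff.mp h
  have hmem : b ∈ badIdx l := by rw [ht]; simp
  refine ⟨(mem_badIdx l b).mp hmem, fun j hj hne => ?_⟩
  have hjm : j ∈ badIdx l := (mem_badIdx l j).mpr ⟨hj, hne⟩
  rw [ht] at hjm
  rcases List.mem_append.mp hjm with h1 | h1
  · have := badIdx_sorted l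
    rw [ht] at this
    have := List.pairwise_append.mp this
    have := this.2.2 j h1 b (List.mem_singleton.mpr rfl)
    omega
  · simp at h1; omega

lemma getLast?_take_pos (l : List Int) (i : Nat) (h0 : 0 < i) (hi : i ≤ l.length) :
    (l.take i).getLast? = l[i - 1]? := by
  rw [List.getLast?_eq_getElem?]
  simp only [List.length_take, Nat.min_eq_left hi]
  exact List.getElem?_take_of_lt (by omega)

lemma left_none (l : List Int) (i : Nat) (hi : i ≤ l.length) (hh : (badIdx l).head? = none) :
    List.IsChain okE (l.take i) := by
  rw [chain_take l i hi]
  have hall := (badIdx_nil_iff l).mp (List.head?_eq_none_iff.mp hh)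
  exact fun j hj => hall j (by omega)

lemma left_some (l : List Int) (i f : Nat) (hi : i ≤ l.length) (hh : (badIdx l).head? = some f) :
    ((i : Int) - 1 ≤ (f : Int)) ↔ List.IsChain okE (l.take i) := by
  rw [chain_take l i hi]
  obtain ⟨⟨hf1, hf2⟩, hmin⟩ := head_badIdx l f hh
  constructor
  · intro hle j hj
    by_contra hne
    have := hmin j (by omega) hne
    omega
  · intro h
    by_contra hlt
    push Not at hlt
    have hfi : f + 1 < i := by omega
    exact hf2 (h f hfi)

lemma right_none (l : List Int) (i : Nat) (hh : (badIdx l).getLast? = none) :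
    List.IsChain okE (l.drop (i + 1)) := by
  rw [chain_drop l (i + 1)]
  have hall := (badIdx_nil_iff l).mp (List.getLast?_eq_none_iff.mp hh)
  exact fun j _ hj => hall j hj

lemma right_some (l : List Int) (i b : Nat) (hh : (badIdx l).getLast? = some b) :
    ((b : Int) ≤ (i : Int)) ↔ List.IsChain okE (l.drop (i + 1)) := by
  rw [chain_drop l (i + 1)]
  obtain ⟨⟨hb1, hb2⟩, hmax⟩ := last_badIdx l b hh
  constructor
  · intro hle j hj1 hj2
    by_contra hne
    have := hmax j hj2 hne
    omega
  · intro h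
    by_contra hlt
    push Not at hlt
    have : i + 1 ≤ b := by omega
    exact hb2 (h b this hb1)

lemma join_iff (l : List Int) (i : Nat) (hi : i < l.length) :
    (∀ x ∈ (l.take i).getLast?, ∀ y ∈ (l.drop (i + 1)).head?, okE x y) ↔
    (if i = 0 ∨ i = l.length - 1 then true
     else
       decide (1 ≤ |PySem.List.pyGetD l ((i : Int) - 1) 0 - PySem.List.pyGetD l ((i : Int) + 1) 0| ∧
               |PySem.List.pyGetD l ((i : Int) - 1) 0 - PySem.List.pyGetD l ((i : Int) + 1) 0| ≤ 3)) = true := by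
  by_cases h0 : i = 0 ∨ i = l.length - 1
  · rw [if_pos h0]
    refine iff_of_true ?_ rfl
    rcases h0 with h0 | h0
    · subst h0; simp
    · intro x hx y hy
      have hlen : i + 1 = l.length := by omega
      rw [List.head?_drop, hlen] at hy
      simp at hy
  · rw [if_neg h0]
    push Not at h0
    have h1 : 0 < i := by omega
    have h2 : i + 1 < l.length := by omega
    rw [getLast?_take_pos l i h1 (by omega), List.head?_drop]
    rw [List.getElem?_eq_getElem (show i - 1 < l.length by omega),
        List.getElem?_eq_getElem h2]
    have e1 : ((i : Int) - 1) = ((i - 1 : Nat) : Int) := by omega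
    have e2 : ((i : Int) + 1) = ((i + 1 : Nat) : Int) := by omega
    rw [e1, e2]
    simp only [PySem.List.pyGetD_natCast, Option.mem_def, Option.some.injEq]
    rw [List.getD_eq_getElem l 0 (show i - 1 < l.length by omega),
        List.getD_eq_getElem l 0 h2]
    constructor
    · intro h
      exact decide_eq_true (h _ rfl _ rfl)
    · intro h x hx y hy
      subst hx; subst hy
      exact of_decide_eq_true h

lemma good_iff (l : List Int) :
    (has_substantial_diff l = false) ↔ (badIdx l).head? = none := by
  rw [hsd_eq_false_iff, List.head?_eq_none_iff, badIdx_nil_iff]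
  have h := chain_take l l.length (le_refl _)
  rw [List.take_length] at h
  rw [h]

lemma cond_eq (l : List Int) (i : Nat) (hi : i < l.length) :
    decide (has_substantial_diff (l.take i ++ l.drop (i + 1)) = false) =
      bbool l ((badIdx l).head?.map (fun j => (j : Int)),
               (badIdx l).getLast?.map (fun j => (j : Int))) i := by
  rw [Bool.eq_iff_iff, decide_eq_true_eq, hsd_eq_false_iff, List.isChain_append]
  rcases hh : (badIdx l).head? with _ | f <;> rcases hl : (badIdx l).getLast? with _ | b <;>
    simp only [bbool, Bool.and_eq_true] <;>
    rw [← join_iff l i hi]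
  · exact ⟨fun ⟨_, _, j⟩ => ⟨⟨rfl, rfl⟩, j⟩,
      fun ⟨_, j⟩ => ⟨left_none l i (le_of_lt hi) hh, right_none l i hl, j⟩⟩
  · exact ⟨fun ⟨_, hcd, j⟩ => ⟨⟨rfl, decide_eq_true ((right_some l i b hl).mpr hcd)⟩, j⟩,
      fun ⟨⟨_, hb⟩, j⟩ => ⟨left_none l i (le_of_lt hi) hh,
        (right_some l i b hl).mp (of_decide_eq_true hb), j⟩⟩
  · exact ⟨fun ⟨hct, _, j⟩ => ⟨⟨decide_eq_true ((left_some l i f (le_of_lt hi) hh).mpr hct), rfl⟩, j⟩,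
      fun ⟨⟨hf, _⟩, j⟩ => ⟨(left_some l i f (le_of_lt hi) hh).mp (of_decide_eq_true hf),
        right_none l i hl, j⟩⟩
  · exact ⟨fun ⟨hct, hcd, j⟩ => ⟨⟨decide_eq_true ((left_some l i f (le_of_lt hi) hh).mpr hct),
        decide_eq_true ((right_some l i b hl).mpr hcd)⟩, j⟩,
      fun ⟨⟨hf, hb⟩, j⟩ => ⟨(left_some l i f (le_of_lt hi) hh).mp (of_decide_eq_true hf),
        (right_some l i b hl).mp (of_decide_eq_true hb), j⟩⟩

lemma scan_eq (l : List Int) :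
    (List.range (l.length - 1)).foldl (altScanStep l) (none, none) =
      ((badIdx l).head?.map (fun j => (j : Int)),
       (badIdx l).getLast?.map (fun j => (j : Int))) := by
  rw [show altScanStep l = (fun (st : Option Int × Option Int) (j : Nat) =>
      if (|PySem.List.pyGetD l (j : Int) 0 - PySem.List.pyGetD l ((j : Int) + 1) 0| < 1 ∨
          |PySem.List.pyGetD l (j : Int) 0 - PySem.List.pyGetD l ((j : Int) + 1) 0| > 3) then
        ((if st.1 = none then some (j : Int) else st.1), some (j : Int))
      else st) from rfl]
  rw [foldFL (fun j => |PySem.List.pyGetD l (j : Int) 0 - PySem.List.pyGetD l ((j : Int) + 1) 0| < 1 ∨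
          |PySem.List.pyGetD l (j : Int) 0 - PySem.List.pyGetD l ((j : Int) + 1) 0| > 3) (l.length - 1)]
  have hfc : ∀ j ∈ List.range (l.length - 1),
      (decide (|PySem.List.pyGetD l (j : Int) 0 - PySem.List.pyGetD l ((j : Int) + 1) 0| < 1 ∨
               |PySem.List.pyGetD l (j : Int) 0 - PySem.List.pyGetD l ((j : Int) + 1) 0| > 3))
        = decide (¬ edge l j) := by
    intro j hj
    have e2 : ((j : Int) + 1) = ((j + 1 : Nat) : Int) := by omega
    rw [e2]
    simp only [PySem.List.pyGetD_natCast]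
    rw [decide_eq_decide]
    unfold edge okE
    omega
  rw [List.filter_congr hfc]
  rfl

lemma rem_eq (l : List Int) (fl : Option Int × Option Int) :
    (List.range l.length).foldl (altRemStep l fl) [] =
      ((List.range l.length).filter (bbool l fl)).map (fun i : Nat => (some (i : Int) : Option Int)) := by
  rw [show altRemStep l fl = (fun (acc : List (Option Int)) (i : Nat) =>
      if bbool l fl i then acc ++ [(some (i : Int) : Option Int)] else acc) from rfl]
  rw [PySem.List.foldl_append_if, List.nil_append]

lemma afold_eq (vs : List (List Int)) :
    (List.range vs.length).foldl (asdStep vs) (true, []) =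
      (true && !((List.range vs.length).any fun i =>
          decide (has_substantial_diff (vs.getD i []) = false)),
       [] ++ ((List.range vs.length).filter (fun i =>
          decide (has_substantial_diff (vs.getD i []) = false))).map
            (fun i : Nat => (some (i : Int) : Option Int))) := by
  rw [show asdStep vs = (fun (st : Bool × List (Option Int)) (i : Nat) =>
      if has_substantial_diff (vs.getD i []) = false then (false, st.2 ++ [some (i : Int)])
      else st) from rfl]
  rw [foldA (fun i => has_substantial_diff (vs.getD i []) = false) (fun i => some (i : Int))]

lemma any_congr_mem (p q : Nat → Bool) (l : List Nat) (h : ∀ x ∈ l, p x = q x) :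
    l.any p = l.any q := by
  induction l with
  | nil => rfl
  | cons x xs ih =>
    simp only [List.any_cons]
    rw [h x (List.mem_cons_self), ih (fun y hy => h y (List.mem_cons_of_mem x hy))]

lemma res_eq (p : Nat → Bool) (xs : List Nat) :
    (true && !(xs.any p)) =
      decide (((xs.filter p).map (fun i : Nat => (some (i : Int) : Option Int))).length = 0) := by
  cases h : xs.any p
  · have hnil : xs.filter p = [] := by
      rw [List.filter_eq_nil_iff]
      exact fun x hx => (List.any_eq_false.mp h) x hx
    simp [hnil]
  · obtain ⟨x, hx, hpx⟩ := List.any_eq_true.mp h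
    have hne : xs.filter p ≠ [] := by
      intro hnil
      rw [List.filter_eq_nil_iff] at hnil
      exact (hnil x hx) hpx
    simp [List.length_eq_zero_iff, hne]

theorem port_eq (line : List Int) :
    almost_substantial_diff line = almost_substantial_diff_alt line := by
  simp only [almost_substantial_diff, almost_substantial_diff_alt]
  rw [scan_eq line, rem_eq line, variants_eq line, afold_eq]
  simp only [List.length_map, List.length_range, List.nil_append]
  have hcc : ∀ i ∈ List.range line.length,
      (fun i => decide (has_substantial_diff
        (((List.range line.length).map (fun i => line.take i ++ line.drop (i + 1))).getD i []) = false)) i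
      = bbool line ((badIdx line).head?.map (fun j => (j : Int)),
                    (badIdx line).getLast?.map (fun j => (j : Int))) i := by
    intro i hi
    rw [List.mem_range] at hi
    simp only []
    rw [PySem.List.getD_map_range _ _ _ _ hi]
    exact cond_eq line i hi
  rw [List.filter_congr hcc, any_congr_mem _ _ _ hcc]
  by_cases hg : has_substantial_diff line = false
  · have hhn : (badIdx line).head? = none := (good_iff line).mp hg
    rw [if_pos hg]
    simp [hhn, List.length_append]
  · have hhn : (badIdx line).head? ≠ none := fun h => hg ((good_iff line).mpr h)
    rw [if_neg hg]
    have hmapne : (badIdx line).head?.map (fun j => (j : Int)) ≠ none := by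
      cases hc : (badIdx line).head? with
      | none => exact absurd hc hhn
      | some f => simp
    rw [if_neg hmapne]
    rw [res_eq]

-- ===== VERDICT (by name: the statement is the Claim_ definition above) =====
theorem almost_substantial_diff_spec : Claim_equal_almost_substantial_diff := by
  intro line _ _
  unfold Spec_almost_substantial_diff
  exact port_eq line
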